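-- pv_equiv track=rewrite | github.com/XSirch/image-scrapper | scrapper.py | _retry_escalation_levels
-- ===== SOURCE A (Python) =====
-- def _retry_escalation_levels(start_level, max_attempts=3):
--     start_level = max(1, min(int(start_level or 1), 4))
--     levels = []
--     level = start_level
--     while len(levels) < max_attempts and level <= 4:
--         levels.append(level)
--         level += 1
--     return levels
-- ===== SOURCE B (Python) =====
-- _LEVELS = (1, 2, 3, 4)
--
-- def _retry_escalation_levels(start_level, max_attempts=3):
--     start_level = max(1, min(int(start_level or 1), 4))
--     return list(_LEVELS[start_level - 1 : start_level - 1 + max(max_attempts, 0)])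
-- ===== Notes on version B (the rewrite author's own statement) =====
-- stated objective: alternative
-- what changed: Replaces the stateful while-loop (accumulator list + counter) by a slice of a constant lookup table (1,2,3,4) of all possible levels: the answer is read out of a precomputed table rather than generated one element at a time.
import Mathlib
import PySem

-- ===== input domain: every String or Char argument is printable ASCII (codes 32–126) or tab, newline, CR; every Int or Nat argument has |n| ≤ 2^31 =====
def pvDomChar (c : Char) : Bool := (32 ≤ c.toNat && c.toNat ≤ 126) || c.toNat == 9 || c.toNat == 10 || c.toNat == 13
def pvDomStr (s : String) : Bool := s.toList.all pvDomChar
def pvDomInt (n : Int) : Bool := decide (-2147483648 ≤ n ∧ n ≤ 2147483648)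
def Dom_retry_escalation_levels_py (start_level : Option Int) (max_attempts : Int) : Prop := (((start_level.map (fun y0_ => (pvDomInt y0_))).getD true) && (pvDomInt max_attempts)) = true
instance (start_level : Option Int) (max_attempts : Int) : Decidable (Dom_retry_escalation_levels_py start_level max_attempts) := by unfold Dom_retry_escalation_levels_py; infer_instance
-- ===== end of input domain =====

-- B replaces A's stateful while-loop (accumulator list + counter) by a slice of a constant
-- lookup table (1,2,3,4) of all possible levels; objective: alternative (same cost).


-- ===== PORT A =====
-- `start_level or 1`: None and 0 are falsy and become 1; int() on an int is the identity.
-- This clamp line is shared verbatim by both Pythons, so both ports use this helper.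
def pvClampStart (start_level : Option Int) : Int :=
  max 1 (min (match start_level with | none => 1 | some x => if x = 0 then 1 else x) 4)

-- the while-loop: state is (levels, level); terminates because level increases towards 4
def pvLoopA (max_attempts : Int) (levels : List Int) (level : Int) : List Int :=
  if (levels.length : Int) < max_attempts ∧ level ≤ 4 then
    pvLoopA max_attempts (levels ++ [level]) (level + 1)
  else levels
termination_by (5 - level).toNat
decreasing_by omega

def retry_escalation_levels_py (start_level : Option Int) (max_attempts : Int) : List Int :=
  pvLoopA max_attempts [] (pvClampStart start_level)

-- ===== PORT B =====
-- the constant table _LEVELS of Source B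
def pvLevelsTable : List Int := [1, 2, 3, 4]

def retry_escalation_levels_py_alt (start_level : Option Int) (max_attempts : Int) : List Int :=
  let s := pvClampStart start_level
  PySem.List.slice pvLevelsTable (some (s - 1)) (some (s - 1 + max max_attempts 0))

-- ===== PRECONDITION & SPEC =====
def Spec_retry_escalation_levels_py (start_level : Option Int) (max_attempts : Int) (out : List Int) : Prop := out = retry_escalation_levels_py_alt start_level max_attempts
instance (start_level : Option Int) (max_attempts : Int) (out : List Int) : Decidable (Spec_retry_escalation_levels_py start_level max_attempts out) := by unfold Spec_retry_escalation_levels_py; infer_instance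

-- ===== CLAIM (what is proved, stated in full; the proofs are below) =====
def Claim_equal_retry_escalation_levels_py : Prop := ∀ (start_level : Option Int) (max_attempts : Int), Dom_retry_escalation_levels_py start_level max_attempts → Spec_retry_escalation_levels_py start_level max_attempts (retry_escalation_levels_py start_level max_attempts)

-- ===== LEMMAS AND PROOFS =====
-- A-side loop invariant: the loop appends exactly the ranged segment up to the arithmetic bound
theorem pvLoopA_eq (n : Nat) (m level : Int) (acc : List Int)
    (hn : (5 - level).toNat ≤ n) :
    pvLoopA m acc level = acc ++ PySem.List.pyRange level (min (level + (m - acc.length)) 5) 1 := by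
  induction n generalizing level acc with
  | zero =>
    rw [pvLoopA]
    rw [if_neg (by omega), PySem.List.pyRange_one_eq_nil (by omega), List.append_nil]
  | succ n ih =>
    rw [pvLoopA]
    by_cases h : (acc.length : Int) < m ∧ level ≤ 4
    · obtain ⟨h1, h2⟩ := h
      rw [if_pos ⟨h1, h2⟩, ih (level + 1) (acc ++ [level]) (by omega)]
      have hb : min (level + 1 + (m - ((acc ++ [level]).length : Int))) 5
          = min (level + (m - (acc.length : Int))) 5 := by
        simp only [List.length_append, List.length_singleton]
        push_cast
        omega
      rw [hb, PySem.List.pyRange_one_cons (show level < min (level + (m - (acc.length : Int))) 5 by omega)]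
      simp
    · rw [if_neg h]
      rw [not_and_or] at h
      rcases h with h | h
      · rw [PySem.List.pyRange_one_eq_nil (by omega), List.append_nil]
      · rw [PySem.List.pyRange_one_eq_nil (by omega), List.append_nil]

-- taking a prefix of a unit-step range truncates its upper endpoint
theorem take_pyRange_one (k : Nat) (a b : Int) :
    (PySem.List.pyRange a b 1).take k = PySem.List.pyRange a (min (a + k) b) 1 := by
  induction k generalizing a with
  | zero =>
    rw [List.take_zero, PySem.List.pyRange_one_eq_nil (by omega)]
  | succ k ih =>
    by_cases h : a < b
    · rw [PySem.List.pyRange_one_cons h, List.take_succ_cons, ih (a + 1)]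
      push_cast
      rw [show min (a + 1 + (k : Int)) b = min (a + ((k : Int) + 1)) b from by omega,
        PySem.List.pyRange_one_cons (show a < min (a + ((k : Int) + 1)) b by omega)]
    · rw [PySem.List.pyRange_one_eq_nil (by omega),
        PySem.List.pyRange_one_eq_nil (by omega), List.take_nil]

-- dropping the first s-1 entries of the table leaves the range from s up to 5
theorem drop_table (s : Int) (h1 : 1 ≤ s) (h4 : s ≤ 4) :
    pvLevelsTable.drop (s - 1).toNat = PySem.List.pyRange s 5 1 := by
  interval_cases s <;> decide

-- B's table slice equals A's ranged segment
theorem slice_table_eq (s m : Int) (h1 : 1 ≤ s) (h4 : s ≤ 4) :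
    PySem.List.slice pvLevelsTable (some (s - 1)) (some (s - 1 + max m 0))
      = PySem.List.pyRange s (min (s + m) 5) 1 := by
  rw [PySem.List.slice_toNat (ha := by omega) (hb := by omega), drop_table s h1 h4]
  by_cases hm : m ≤ 0
  · have hk : (s - 1 + max m 0).toNat - (s - 1).toNat = 0 := by omega
    rw [hk, List.take_zero, PySem.List.pyRange_one_eq_nil (by omega)]
  · have hk : (s - 1 + max m 0).toNat - (s - 1).toNat = m.toNat := by omega
    rw [hk, take_pyRange_one]
    have : s + (m.toNat : Int) = s + m := by omega
    rw [this]

-- ===== VERDICT (by name: the statement is the Claim_ definition above) =====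
theorem retry_escalation_levels_py_spec : Claim_equal_retry_escalation_levels_py := by
  intro s m _
  show _ = _
  unfold retry_escalation_levels_py retry_escalation_levels_py_alt
  rw [pvLoopA_eq ((5 - pvClampStart s).toNat) m (pvClampStart s) [] le_rfl,
    slice_table_eq (pvClampStart s) m (by unfold pvClampStart; omega) (by unfold pvClampStart; omega)]
  simp
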